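-- pv_equiv track=rewrite | github.com/marcelofabiangutierrez88/PythonEnClase | manejoCadenas5.4.py | palMenLen
-- ===== SOURCE A (Python) =====
-- def esLetra(x):
--     return (x>='a' and x<='z') or (x>='A' and x<='Z')
--
-- def palMenor (pa, pb):
--     res = pb
--     if len(pa) < len(pb):
--         res = pa
--     return res
--
-- def palMenLen(texto):
--     pal=""
--     palMen =""
--     lenTexto = len(texto)
--     i=0
--
--     if lenTexto!=0:
--         while i < lenTexto:
--             pal=""
--             while (i<lenTexto and not (esLetra(texto[i]))):
--                 i+=1
--             while (i<lenTexto and esLetra(texto[i])):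
--                 pal = pal + texto[i]
--                 i+=1
--             if pal!="":
--                 if palMen!="":
--                     palMen = palMenor (palMen,pal)
--                 else:
--                     palMen = pal
--     return palMen
-- ===== SOURCE B (Python) =====
-- def palMenLen(texto):
--     words = []
--     cur = []
--     for ch in texto:
--         if ('a' <= ch <= 'z') or ('A' <= ch <= 'Z'):
--             cur.append(ch)
--         elif cur:
--             words.append(''.join(cur))
--             cur = []
--     if cur:
--         words.append(''.join(cur))
--     if not words:
--         return ""
--     return min(reversed(words), key=len)
-- ===== Notes on version B (the rewrite author's own statement) =====
-- stated objective: faster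
-- what changed: A's single interleaved index loop (skip non-letters / grow word via pal = pal + ch / update running minimum via palMenor) is replaced by two separate phases: one character pass that collects all maximal letter runs into a list (amortized O(1) appends + join), then min over the reversed list keyed by length, which picks the last shortest word exactly as A's tie-breaking does.
import Mathlib
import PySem

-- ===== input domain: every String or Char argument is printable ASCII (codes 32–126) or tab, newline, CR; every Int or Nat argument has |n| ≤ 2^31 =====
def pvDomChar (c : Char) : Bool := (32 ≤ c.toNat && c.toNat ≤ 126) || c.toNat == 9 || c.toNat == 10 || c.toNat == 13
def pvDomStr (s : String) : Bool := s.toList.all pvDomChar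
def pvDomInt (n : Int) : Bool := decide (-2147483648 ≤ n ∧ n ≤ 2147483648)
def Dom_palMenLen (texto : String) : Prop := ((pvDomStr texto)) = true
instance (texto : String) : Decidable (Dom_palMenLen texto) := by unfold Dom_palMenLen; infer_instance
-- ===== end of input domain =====

-- B replaces A's interleaved index/while scan (which grows each word by string concatenation)
-- with two phases — collect all letter runs in one character pass, then take
-- min(reversed(words), key=len) — same values; a timing run measured B faster.

-- ===== PORT A =====
def pvA_esLetra (x : Char) : Bool :=
  (decide ('a' ≤ x) && decide (x ≤ 'z')) || (decide ('A' ≤ x) && decide (x ≤ 'Z'))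

def pvA_palMenor (pa pb : String) : String :=
  let res := pb
  if PySem.Str.len pa < PySem.Str.len pb then pa else res

-- inner while: skip non-letters
def pvA_skip : List Char → List Char
  | [] => []
  | c :: cs => if ¬ pvA_esLetra c then pvA_skip cs else c :: cs

-- inner while: accumulate the current word
def pvA_word (pal : String) : List Char → String × List Char
  | [] => (pal, [])
  | c :: cs => if pvA_esLetra c then pvA_word (pal.push c) cs else (pal, c :: cs)

-- termination facts for the outer while (cited in decreasing_by)
theorem pvA_skip_le (cs : List Char) : (pvA_skip cs).length ≤ cs.length := by
  induction cs with
  | nil => simp [pvA_skip]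
  | cons c cs ih =>
    simp only [pvA_skip]; split
    · exact le_trans ih (by simp only [List.length_cons]; omega)
    · simp

theorem pvA_skip_head (cs : List Char) (c : Char) (cs' : List Char)
    (h : pvA_skip cs = c :: cs') : pvA_esLetra c = true := by
  induction cs with
  | nil => simp [pvA_skip] at h
  | cons d ds ih =>
    simp only [pvA_skip] at h
    split at h
    · exact ih h
    · rename_i hd; cases h; simpa using hd

theorem pvA_word_le (cs : List Char) : ∀ pal, ((pvA_word pal cs).2).length ≤ cs.length := by
  induction cs with
  | nil => intro pal; simp [pvA_word]
  | cons c cs ih =>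
    intro pal; simp only [pvA_word]; split
    · exact le_trans (ih _) (by simp only [List.length_cons]; omega)
    · simp

theorem pvA_rest_lt (cs : List Char) (h : cs ≠ []) :
    ((pvA_word "" (pvA_skip cs)).2).length < cs.length := by
  cases hs : pvA_skip cs with
  | nil => simp [pvA_word]; cases cs with | nil => exact absurd rfl h | cons a b => simp
  | cons c cs' =>
    have hc := pvA_skip_head cs c cs' hs
    have h1 : ((pvA_word "" (c :: cs')).2).length < (c :: cs').length := by
      simp only [pvA_word, hc, if_pos]
      calc ((pvA_word ("".push c) cs').2).length ≤ cs'.length := pvA_word_le cs' _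
        _ < (c :: cs').length := by simp
    have h2 : (c :: cs').length ≤ cs.length := hs ▸ pvA_skip_le cs
    omega

-- outer while
def pvA_main (palMen : String) (cs : List Char) : String :=
  match cs with
  | [] => palMen
  | c :: cs' =>
    let r := pvA_word "" (pvA_skip (c :: cs'))
    let palMen' := if r.1 ≠ "" then (if palMen ≠ "" then pvA_palMenor palMen r.1 else r.1) else palMen
    pvA_main palMen' r.2
termination_by cs.length
decreasing_by exact pvA_rest_lt (c :: cs') (by simp)

def palMenLen (texto : String) : String :=
  if PySem.Str.len texto ≠ 0 then pvA_main "" texto.toList else ""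

-- ===== PORT B =====
def pvB_isLetter (ch : Char) : Bool :=
  (decide ('a' ≤ ch) && decide (ch ≤ 'z')) || (decide ('A' ≤ ch) && decide (ch ≤ 'Z'))

def pvB_step (st : List String × List Char) (ch : Char) : List String × List Char :=
  if pvB_isLetter ch then (st.1, st.2 ++ [ch])
  else if st.2 ≠ [] then (st.1 ++ [String.ofList st.2], []) else st

def palMenLen_alt (texto : String) : String :=
  let st := texto.toList.foldl pvB_step ([], [])
  let words := if st.2 ≠ [] then st.1 ++ [String.ofList st.2] else st.1
  if words = [] then "" else PySem.List.minD words.reverse (fun w => PySem.Str.len w) ""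

-- ===== PRECONDITION & SPEC =====
def Spec_palMenLen (texto : String) (out : String) : Prop := out = palMenLen_alt texto
instance (texto : String) (out : String) : Decidable (Spec_palMenLen texto out) := by unfold Spec_palMenLen; infer_instance

-- ===== CLAIM (what is proved, stated in full; the proofs are below) =====
def Claim_equal_palMenLen : Prop := ∀ (texto : String), Dom_palMenLen texto → Spec_palMenLen texto (palMenLen texto)

-- ===== LEMMAS AND PROOFS =====

-- the list of maximal letter runs, following A's skip/word decomposition
def pvW (cs : List Char) : List String :=
  match cs with
  | [] => []
  | c :: cs' =>
    let r := pvA_word "" (pvA_skip (c :: cs'))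
    (if r.1 ≠ "" then [r.1] else []) ++ pvW r.2
termination_by cs.length
decreasing_by exact pvA_rest_lt (c :: cs') (by simp)

def pvSel (m w : String) : String := if m ≠ "" then pvA_palMenor m w else w

-- last-minimal selection, foldr-shaped (what min over the reversed list computes)
def pvN : List String → Option String
  | [] => none
  | w :: ws =>
    match pvN ws with
    | none => some w
    | some m => if PySem.Str.len w < PySem.Str.len m then some w else some m

theorem pvA_main_eq (n : Nat) : ∀ cs : List Char, cs.length ≤ n → ∀ palMen,
    pvA_main palMen cs = (pvW cs).foldl pvSel palMen := by
  induction n with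
  | zero =>
    intro cs h palMen
    have : cs = [] := by cases cs <;> simp_all
    subst this; simp [pvA_main, pvW]
  | succ n ih =>
    intro cs h palMen
    cases cs with
    | nil => simp [pvA_main, pvW]
    | cons c cs' =>
      rw [pvA_main]
      conv_rhs => rw [pvW]
      have hlt := pvA_rest_lt (c :: cs') (by simp)
      rw [ih _ (by simp only [List.length_cons] at h hlt ⊢; omega)]
      rw [List.foldl_append]
      by_cases hp : (pvA_word "" (pvA_skip (c :: cs'))).1 = "" <;>
        simp [hp, pvSel]

theorem pvW_ne_empty (n : Nat) : ∀ cs : List Char, cs.length ≤ n → ∀ w ∈ pvW cs, w ≠ "" := by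
  induction n with
  | zero =>
    intro cs h
    have : cs = [] := by cases cs <;> simp_all
    subst this; simp [pvW]
  | succ n ih =>
    intro cs h
    cases cs with
    | nil => simp [pvW]
    | cons c cs' =>
      rw [pvW]
      intro w hw
      have hlt := pvA_rest_lt (c :: cs') (by simp)
      rcases List.mem_append.mp hw with h1 | h2
      · by_cases hp : (pvA_word "" (pvA_skip (c :: cs'))).1 = ""
        · simp [hp] at h1
        · simp [hp] at h1; simpa [h1] using hp
      · exact ih _ (by simp only [List.length_cons] at h hlt ⊢; omega) w h2

-- B-side word collection, char by char
def pvG (cur : List Char) : List Char → List String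
  | [] => if cur ≠ [] then [String.ofList cur] else []
  | c :: cs =>
    if pvB_isLetter c then pvG (cur ++ [c]) cs
    else (if cur ≠ [] then [String.ofList cur] else []) ++ pvG [] cs

theorem pvB_fold_eq (cs : List Char) : ∀ ws cur,
    (let st := cs.foldl pvB_step (ws, cur);
     if st.2 ≠ [] then st.1 ++ [String.ofList st.2] else st.1) = ws ++ pvG cur cs := by
  induction cs with
  | nil =>
    intro ws cur
    by_cases h : cur = [] <;> simp [pvG, h]
  | cons c cs ih =>
    intro ws cur
    by_cases hc : pvB_isLetter c
    · simpa [pvG, hc, pvB_step] using ih ws (cur ++ [c])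
    · by_cases h : cur = []
      · simpa [pvG, hc, pvB_step, h] using ih ws []
      · simpa [pvG, hc, pvB_step, h] using ih (ws ++ [String.ofList cur]) []

theorem pvW_eq_word (cs : List Char) :
    (let r := pvA_word "" cs; (if r.1 ≠ "" then [r.1] else []) ++ pvW r.2) = pvW cs := by
  cases cs with
  | nil => simp [pvA_word, pvW]
  | cons c cs' =>
    by_cases hc : pvA_esLetra c
    · conv_rhs => rw [pvW]
      simp [pvA_skip, hc]
    · simp [pvA_word, hc]

theorem pvW_cons_nonletter (c : Char) (cs : List Char) (h : ¬ pvA_esLetra c) :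
    pvW (c :: cs) = pvW cs := by
  cases cs with
  | nil => rw [pvW]; simp [pvA_skip, h, pvA_word, pvW]
  | cons d ds =>
    rw [pvW]
    conv_rhs => rw [pvW]
    simp [pvA_skip, h]

theorem pvG_eq (cs : List Char) : ∀ cur,
    pvG cur cs = (let r := pvA_word (String.ofList cur) cs; (if r.1 ≠ "" then [r.1] else []) ++ pvW r.2) := by
  induction cs with
  | nil =>
    intro cur
    simp [pvG, pvA_word, pvW, String.ofList_eq_empty_iff]
  | cons c cs ih =>
    intro cur
    by_cases hc : pvA_esLetra c
    · have hb : pvB_isLetter c := by simpa [pvB_isLetter] using (by simpa [pvA_esLetra] using hc)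
      have hpush : (String.ofList cur).push c = String.ofList (cur ++ [c]) := by
        apply String.toList_inj.mp; simp
      simp only [pvG, hb, if_pos, pvA_word, hc, hpush]
      exact ih (cur ++ [c])
    · have hb : ¬ pvB_isLetter c := by simpa [pvB_isLetter] using (by simpa [pvA_esLetra] using hc)
      simp only [pvG, hb, pvA_word, hc]
      have hrest : pvG [] cs = pvW (c :: cs) := by
        rw [pvW_cons_nonletter c cs hc, ← pvW_eq_word cs]
        simpa using ih []
      simp [hrest, String.ofList_eq_empty_iff]

theorem pvG_nil_eq_pvW (cs : List Char) : pvG [] cs = pvW cs := by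
  rw [← pvW_eq_word cs]
  simpa using pvG_eq cs []

theorem pvFold_sel_eq (ws : List String) : ∀ m : String, m ≠ "" → (∀ w ∈ ws, w ≠ "") →
    ws.foldl pvSel m = (match pvN ws with
      | none => m
      | some r => if PySem.Str.len m < PySem.Str.len r then m else r) := by
  induction ws with
  | nil => intro m _ _; simp [pvN]
  | cons w ws ih =>
    intro m hm hall
    have hw : w ≠ "" := hall w (by simp)
    have hsel : pvSel m w ≠ "" := by
      simp only [pvSel, pvA_palMenor]
      split_ifs <;> assumption
    simp only [List.foldl_cons]
    rw [ih (pvSel m w) hsel (fun x hx => hall x (by simp [hx]))]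
    rcases hN : pvN ws with _ | r
    · simp [pvN, hN, pvSel, hm, pvA_palMenor]
    · simp only [pvN, hN]
      simp only [pvSel, hm, ne_eq, not_false_eq_true, if_true, pvA_palMenor]
      clear ih hall hsel
      split_ifs <;> simp_all <;> omega

theorem pvMin_rev (ws : List String) :
    PySem.List.min? ws.reverse (fun w => PySem.Str.len w) = pvN ws := by
  simp only [PySem.List.min?, List.foldl_reverse]
  induction ws with
  | nil => simp [pvN]
  | cons w ws ih =>
    rw [List.foldr_cons, ih]
    rcases hN : pvN ws with _ | m <;> simp [pvN, hN]

-- ===== VERDICT (by name: the statement is the Claim_ definition above) =====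
theorem palMenLen_spec : Claim_equal_palMenLen := by
  intro texto _
  unfold Spec_palMenLen palMenLen palMenLen_alt
  simp only []
  have hwords : (let st := texto.toList.foldl pvB_step ([], []);
      if st.2 ≠ [] then st.1 ++ [String.ofList st.2] else st.1) = pvW texto.toList := by
    rw [pvB_fold_eq texto.toList [] []]; simpa using pvG_nil_eq_pvW texto.toList
  simp only at hwords
  rw [hwords]
  by_cases hl : texto.toList = []
  · simp [hl, PySem.Str.len, pvW]
  · have hlen : PySem.Str.len texto ≠ 0 := by
      simp only [PySem.Str.len_eq]
      intro hc
      exact hl (List.length_eq_zero_iff.mp (by exact_mod_cast hc))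
    rw [if_pos hlen]
    rw [pvA_main_eq texto.toList.length texto.toList le_rfl ""]
    cases hW : pvW texto.toList with
    | nil => simp
    | cons w ws =>
      have hne := pvW_ne_empty texto.toList.length texto.toList le_rfl
      rw [hW] at hne
      have hw : w ≠ "" := hne w (by simp)
      simp only [List.foldl_cons]
      have h0 : pvSel "" w = w := by simp [pvSel]
      rw [h0, pvFold_sel_eq ws w hw (fun x hx => hne x (by simp [hx]))]
      have hcons : (w :: ws) ≠ ([] : List String) := by simp
      simp only [if_neg hcons]
      simp only [PySem.List.minD, pvMin_rev (w :: ws), pvN]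
      rcases pvN ws with _ | r
      · simp
      · simp
        split <;> simp
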